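-- pv_equiv track=rewrite | github.com/grquigg/BFOProver | kowalski2.py | skolem_search
-- ===== SOURCE A (Python) =====
-- MAX_SKOLEM_DEPTH = 2
--
-- def skolem_search(skolem, skolem_table, depth):
--     if(depth > MAX_SKOLEM_DEPTH):
--         return False
--     sk = skolem_table[skolem]
--     for e in sk[2]:
--         if "sk" in e:
--             if(skolem_search(e, skolem_table, depth+1)):
--                 continue
--             else:
--                 return False
--     return True
--     pass
-- ===== SOURCE B (Python) =====
-- MAX_SKOLEM_DEPTH = 2
--
-- def skolem_search(skolem, skolem_table, depth):
--     # Iterative pre-order DFS with an explicit stack instead of recursion.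
--     stack = [(skolem, depth)]
--     while stack:
--         node, d = stack.pop()
--         if d > MAX_SKOLEM_DEPTH:
--             return False
--         sk = skolem_table[node]
--         stack.extend((e, d + 1) for e in reversed(sk[2]) if "sk" in e)
--     return True
-- ===== Notes on version B (the rewrite author's own statement) =====
-- stated objective: alternative
-- what changed: Replaces A's mutual recursion (recursive call inside a for-loop) by an iterative pre-order DFS over an explicit stack of (node, depth) pairs, pushing children in reverse so the traversal order and first-failure result are identical.
-- outside the precondition, e.g. on skolem_search('a', {'a': [[], [], []], 'b': []}, 0): A returns True, B returns True; on skolem_search('a', {'a': [[], [], []], 'b': [[], [], ['xsk']]}, 0): A returns True, B returns True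
import Mathlib
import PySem

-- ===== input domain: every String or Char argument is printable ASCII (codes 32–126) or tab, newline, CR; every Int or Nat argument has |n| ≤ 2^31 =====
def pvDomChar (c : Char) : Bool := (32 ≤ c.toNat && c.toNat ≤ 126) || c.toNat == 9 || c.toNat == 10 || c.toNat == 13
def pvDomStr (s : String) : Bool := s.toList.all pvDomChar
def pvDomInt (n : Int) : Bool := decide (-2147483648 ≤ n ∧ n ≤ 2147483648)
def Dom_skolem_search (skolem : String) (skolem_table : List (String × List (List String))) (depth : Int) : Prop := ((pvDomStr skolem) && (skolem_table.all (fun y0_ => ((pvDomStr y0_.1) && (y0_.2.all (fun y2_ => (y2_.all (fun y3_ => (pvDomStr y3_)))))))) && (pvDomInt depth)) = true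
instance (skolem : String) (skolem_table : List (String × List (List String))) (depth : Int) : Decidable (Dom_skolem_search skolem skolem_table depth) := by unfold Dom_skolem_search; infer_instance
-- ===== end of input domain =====

-- B replaces A's recursion by an iterative pre-order DFS over an explicit stack (alternative, same cost);
-- equivalence is about the RETURN value (neither program mutates its arguments).

def MAX_SKOLEM_DEPTH : Int := 2

-- small named lemmas cited by the termination proofs below (kept above the ports because the
-- ports' `decreasing_by` cite them by name)
theorem pv_lexA {a b n m : Nat} (h : a < b) : Prod.Lex (· < ·) (· < ·) (a, n) (b, m) :=
  Prod.Lex.left _ _ h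
theorem pv_lexB {a n m : Nat} (h : n < m) : Prod.Lex (· < ·) (· < ·) (a, n) (a, m) :=
  Prod.Lex.right _ h
theorem pv_toNat_lt (depth : Int) (h : ¬ depth > MAX_SKOLEM_DEPTH) :
    (4 - (depth + 1)).toNat < (4 - depth).toNat := by
  have h2 : depth ≤ 2 := not_lt.mp h
  have h0 : (0 : Int) < 4 - depth := Int.sub_pos.mpr (lt_of_le_of_lt h2 (by decide))
  exact (Int.toNat_lt_toNat h0).mpr (sub_lt_sub_left (lt_add_one depth) 4)

-- ===== PORT A =====
-- Literal port of A: the recursive call sits inside the for-loop over sk[2]; the loop is the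
-- mutual helper `skolem_search_forloop` (continue/return False become the two if-branches).
-- Where Python raises (KeyError on a missing key, IndexError when len(sk) < 3) the port returns
-- false; those inputs are excluded by Pre_skolem_search.
mutual
def skolem_search (skolem : String) (skolem_table : List (String × List (List String))) (depth : Int) : Bool :=
  if _h : depth > MAX_SKOLEM_DEPTH then false
  else
    match (PySem.Dict.mk skolem_table).get? skolem with
    | none => false      -- Python: KeyError (outside Pre_)
    | some sk =>
      match PySem.List.pyGet? sk 2 with
      | none => false    -- Python: IndexError (outside Pre_)
      | some lst => skolem_search_forloop skolem_table lst (depth + 1)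
termination_by ((4 - depth).toNat, 0)
decreasing_by exact pv_lexA (pv_toNat_lt depth _h)

def skolem_search_forloop (skolem_table : List (String × List (List String))) (lst : List String) (depth1 : Int) : Bool :=
  match lst with
  | [] => true
  | e :: rest =>
    if PySem.Str.isIn "sk" e then
      if skolem_search e skolem_table depth1 then skolem_search_forloop skolem_table rest depth1
      else false
    else skolem_search_forloop skolem_table rest depth1
termination_by ((4 - depth1).toNat, lst.length)
decreasing_by all_goals exact pv_lexB (by simp)
end

-- ===== PORT B =====
-- weight bookkeeping used only for the termination measure of the DFS loop
def pvWt (W : Nat) (d : Int) : Nat := (W + 1) ^ (4 - d).toNat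
def pvStackWt (W : Nat) (st : List (String × Int)) : Nat := (st.map (fun p => pvWt W p.2)).sum
def pvTblW (tbl : List (String × List (List String))) : Nat :=
  (tbl.map (fun p => ((PySem.List.pyGet? p.2 2).getD []).length)).foldr max 0

theorem pv_le_foldr_max (n : Nat) (l : List Nat) (h : n ∈ l) : n ≤ l.foldr max 0 := by
  induction l with
  | nil => cases h
  | cons x xs ih =>
    rw [List.mem_cons] at h
    rcases h with rfl | h
    · exact le_max_left _ _
    · exact le_trans (ih h) (le_max_right _ _)

theorem pv_get?_mem {tbl : List (String × List (List String))} {k : String} {v : List (List String)}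
    (h : (PySem.Dict.mk tbl).get? k = some v) : (k, v) ∈ tbl := by
  induction tbl with
  | nil => simp [PySem.Dict.get?] at h
  | cons p rest ih =>
    obtain ⟨pk, pv⟩ := p
    rw [PySem.Dict.get?_mk_cons] at h
    by_cases hk : pk == k
    · simp [hk] at h
      have : pk = k := eq_of_beq hk
      subst this; subst h; exact List.mem_cons_self
    · simp [hk] at h; exact List.mem_cons_of_mem _ (ih h)

theorem pv_dfs_dec (W : Nat) (node : String) (d : Int) (rest : List (String × Int))
    (lst : List String) (hd : ¬ d > 2) (hW : lst.length ≤ W) :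
    pvStackWt W (((lst.filter (fun e => PySem.Str.isIn "sk" e)).map (fun e => (e, d + 1))) ++ rest)
      < pvStackWt W ((node, d) :: rest) := by
  unfold pvStackWt
  rw [List.map_append, List.sum_append, List.map_map]
  have hrep : ((lst.filter (fun e => PySem.Str.isIn "sk" e)).map
      ((fun p : String × Int => pvWt W p.2) ∘ (fun e => (e, d + 1)))) =
      List.replicate (lst.filter (fun e => PySem.Str.isIn "sk" e)).length (pvWt W (d + 1)) := by
    induction (lst.filter (fun e => PySem.Str.isIn "sk" e)) with
    | nil => simp
    | cons x xs ih => simp [Function.comp, List.replicate_succ] at ih ⊢; exact ih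
  rw [hrep, List.sum_replicate, smul_eq_mul]
  simp only [List.map_cons, List.sum_cons]
  have hlen : (lst.filter (fun e => PySem.Str.isIn "sk" e)).length ≤ W :=
    le_trans (List.length_filter_le _ _) hW
  have h2 : d ≤ 2 := not_lt.mp hd
  have h0 : (0 : Int) ≤ 3 - d := Int.sub_nonneg.mpr (le_trans h2 (by decide))
  have hpow : (4 - d).toNat = (3 - d).toNat + 1 := by
    rw [show (4 : Int) - d = (3 - d) + 1 from by ring, Int.toNat_add h0 (by decide)]
    rfl
  have h1 : (4 - (d + 1)).toNat = (3 - d).toNat :=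
    congrArg Int.toNat (by ring)
  have hpos : 0 < (W + 1) ^ (3 - d).toNat := pow_pos (Nat.succ_pos W) _
  have hlt : (lst.filter (fun e => PySem.Str.isIn "sk" e)).length * pvWt W (d + 1) < pvWt W d := by
    unfold pvWt
    rw [h1, hpow, pow_succ]
    calc (lst.filter (fun e => PySem.Str.isIn "sk" e)).length * (W + 1) ^ (3 - d).toNat
        ≤ W * (W + 1) ^ (3 - d).toNat := Nat.mul_le_mul_right _ hlen
      _ < (W + 1) * (W + 1) ^ (3 - d).toNat :=
          Nat.mul_lt_mul_of_lt_of_le (Nat.lt_succ_self W) (le_refl _) hpos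
      _ = (W + 1) ^ (3 - d).toNat * (W + 1) := Nat.mul_comm _ _
  exact Nat.add_lt_add_right hlt _

theorem pv_dfs_dec_all (skolem_table : List (String × List (List String))) (node : String)
    (d : Int) (rest : List (String × Int)) (sk : List (List String)) (lst : List String)
    (h : ¬ d > MAX_SKOLEM_DEPTH) (hg : (PySem.Dict.mk skolem_table).get? node = some sk)
    (hl : PySem.List.pyGet? sk 2 = some lst) :
    pvStackWt (pvTblW skolem_table)
        (((lst.filter (fun e => PySem.Str.isIn "sk" e)).map (fun e => (e, d + 1))) ++ rest)
      < pvStackWt (pvTblW skolem_table) ((node, d) :: rest) := by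
  apply pv_dfs_dec
  · simp only [MAX_SKOLEM_DEPTH, not_lt] at h; omega
  · have hmem := pv_get?_mem hg
    have hmm : ((PySem.List.pyGet? sk 2).getD []).length
        ∈ (skolem_table.map (fun p => ((PySem.List.pyGet? p.2 2).getD []).length)) :=
      List.mem_map_of_mem hmem
    have := pv_le_foldr_max _ _ hmm
    simpa [pvTblW, hl] using this

-- Port of Source B: the stack is a Lean list with its head as the stack's top; Source B pops from the end
-- and extends with the children in reversed order, which is exactly prepending the children in
-- their original order here.
def skolem_search_dfs (skolem_table : List (String × List (List String))) (st : List (String × Int)) : Bool :=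
  match st with
  | [] => true
  | (node, d) :: rest =>
    if _h : d > MAX_SKOLEM_DEPTH then false
    else
      match _hg : (PySem.Dict.mk skolem_table).get? node with
      | none => false      -- Python: KeyError (outside Pre_)
      | some sk =>
        match _hl : PySem.List.pyGet? sk 2 with
        | none => false    -- Python: IndexError (outside Pre_)
        | some lst =>
          skolem_search_dfs skolem_table
            (((lst.filter (fun e => PySem.Str.isIn "sk" e)).map (fun e => (e, d + 1))) ++ rest)
termination_by pvStackWt (pvTblW skolem_table) st
decreasing_by exact pv_dfs_dec_all skolem_table node d rest sk lst _h _hg _hl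

def skolem_search_alt (skolem : String) (skolem_table : List (String × List (List String))) (depth : Int) : Bool :=
  skolem_search_dfs skolem_table [(skolem, depth)]

-- ===== PRECONDITION & SPEC =====
-- Pre_ excludes exactly the inputs on which Python A raises: with depth ≤ MAX_SKOLEM_DEPTH it
-- looks keys up and indexes value[2], so we require the start key to be present and, globally,
-- every table value to have length ≥ 3 and every "sk"-containing string in any value[2] to be a
-- key.  The global condition is slightly stronger than the reachable-only one A needs (a
-- malformed entry the search never visits is also excluded) — a reachability condition would
-- re-simulate the search; see claim.json "cites" for excluded-but-returning examples.
def Pre_skolem_search (skolem : String) (skolem_table : List (String × List (List String))) (depth : Int) : Prop :=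
  depth > 2 ∨
  (((PySem.Dict.mk skolem_table).get? skolem).isSome = true ∧
   ∀ p ∈ skolem_table, 3 ≤ p.2.length ∧
     ∀ e ∈ (PySem.List.pyGet? p.2 2).getD [],
       PySem.Str.isIn "sk" e = true → ((PySem.Dict.mk skolem_table).get? e).isSome = true)
instance (skolem : String) (skolem_table : List (String × List (List String))) (depth : Int) : Decidable (Pre_skolem_search skolem skolem_table depth) := by unfold Pre_skolem_search; infer_instance

def pvWitness_skolem_search : String × (List (String × List (List String))) × Int :=
  ("f1", [("f1", [[], [], ["x"]])], 0)

def Spec_skolem_search (skolem : String) (skolem_table : List (String × List (List String))) (depth : Int) (out : Bool) : Prop := out = skolem_search_alt skolem skolem_table depth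
instance (skolem : String) (skolem_table : List (String × List (List String))) (depth : Int) (out : Bool) : Decidable (Spec_skolem_search skolem skolem_table depth out) := by unfold Spec_skolem_search; infer_instance

-- ===== CLAIM (what is proved, stated in full; the proofs are below) =====
def Claim_equal_skolem_search : Prop := ∀ (skolem : String) (skolem_table : List (String × List (List String))) (depth : Int), Dom_skolem_search skolem skolem_table depth → Pre_skolem_search skolem skolem_table depth → Spec_skolem_search skolem skolem_table depth (skolem_search skolem skolem_table depth)

-- ===== LEMMAS AND PROOFS =====

-- A's for-loop equals "every 'sk'-containing child passes the recursive check"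
theorem pv_forloop_eq_all (tbl : List (String × List (List String))) (lst : List String) (d : Int) :
    skolem_search_forloop tbl lst d
      = (lst.filter (fun e => PySem.Str.isIn "sk" e)).all (fun e => skolem_search e tbl d) := by
  induction lst with
  | nil => rw [skolem_search_forloop]; rfl
  | cons e rest ih =>
    rw [skolem_search_forloop]
    cases hceq : PySem.Str.isIn "sk" e with
    | false =>
      rw [if_neg (by simp), List.filter_cons_of_neg (by simpa using hceq)]
      exact ih
    | true =>
      rw [if_pos rfl, List.filter_cons_of_pos (by simpa using hceq), List.all_cons]
      cases hr : skolem_search e tbl d with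
      | false => rw [if_neg (by simp), Bool.false_and]
      | true => rw [if_pos rfl, ih, Bool.true_and]

-- one-step unfolding of the DFS on a non-empty stack (the named match binders in the
-- definition exist only for the termination proof)
theorem pv_dfs_cons (tbl : List (String × List (List String))) (node : String) (d : Int)
    (rest : List (String × Int)) :
    skolem_search_dfs tbl ((node, d) :: rest) =
      if d > MAX_SKOLEM_DEPTH then false
      else match (PySem.Dict.mk tbl).get? node with
        | none => false
        | some sk =>
          match PySem.List.pyGet? sk 2 with
          | none => false
          | some lst =>
            skolem_search_dfs tbl
              (((lst.filter (fun e => PySem.Str.isIn "sk" e)).map (fun e => (e, d + 1))) ++ rest) := by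
  rw [skolem_search_dfs]
  by_cases h : d > MAX_SKOLEM_DEPTH
  · simp [h]
  · simp only [dif_neg h, if_neg h]
    split
    · rename_i hsp; simp [hsp]
    · rename_i sk hsp
      split
      · rename_i hsp2; simp [hsp, hsp2]
      · rename_i lst hsp2; simp [hsp, hsp2]

-- the DFS over a stack equals checking each stacked (node, depth) pair with A
theorem pv_dfs_eq_all (tbl : List (String × List (List String))) (st : List (String × Int)) :
    skolem_search_dfs tbl st = st.all (fun p => skolem_search p.1 tbl p.2) := by
  induction st using skolem_search_dfs.induct tbl with
  | case1 => rw [skolem_search_dfs]; rfl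
  | case2 node d rest h =>
    rw [pv_dfs_cons]
    simp only [List.all_cons]
    rw [skolem_search.eq_def]
    simp [h]
  | case3 node d rest h hg =>
    rw [pv_dfs_cons]
    simp only [List.all_cons]
    rw [skolem_search.eq_def]
    simp [h, hg]
  | case4 node d rest h sk hg hl =>
    rw [pv_dfs_cons]
    simp only [List.all_cons]
    rw [skolem_search.eq_def]
    simp [h, hg, hl]
  | case5 node d rest h sk hg lst hl ih =>
    rw [pv_dfs_cons, if_neg h]
    simp only [hg, hl]
    rw [ih, List.all_append]
    simp only [List.all_cons]
    rw [skolem_search.eq_def, dif_neg h]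
    simp only [hg, hl, pv_forloop_eq_all]
    simp [List.all_map, Function.comp]

-- ===== VERDICT (by name: the statement is the Claim_ definition above) =====
theorem skolem_search_spec : Claim_equal_skolem_search := by
  intro skolem skolem_table depth _ _
  unfold Spec_skolem_search skolem_search_alt
  rw [pv_dfs_eq_all]
  simp
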